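-- pv_equiv track=rewrite | github.com/shashank-d3v/tidingsiq | app/streamlit/brief_state.py | prune_selection_to_options
-- ===== SOURCE A (Python) =====
-- def normalize_brief_selection(values: list[str] | tuple[str, ...]) -> list[str]:
--     normalized: list[str] = []
--     seen: set[str] = set()
--     for value in values:
--         text = str(value).strip()
--         if not text or text in seen:
--             continue
--         seen.add(text)
--         normalized.append(text)
--     return normalized
--
-- def prune_selection_to_options(
--     selected_values: list[str] | tuple[str, ...],
--     valid_options: list[str] | tuple[str, ...],
-- ) -> list[str]:
--     valid_option_set = set(normalize_brief_selection(valid_options))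
--     return [
--         value
--         for value in normalize_brief_selection(selected_values)
--         if value in valid_option_set
--     ]
-- ===== SOURCE B (Python) =====
-- def prune_selection_to_options(selected_values, valid_options):
--     valid_option_set = {str(v).strip() for v in valid_options}
--     result = []
--     remaining = list(selected_values)
--     while remaining:
--         text = str(remaining[0]).strip()
--         if text and text in valid_option_set:
--             result.append(text)
--         remaining = [v for v in remaining[1:] if str(v).strip() != text]
--     return result
-- ===== Notes on version B (the rewrite author's own statement) =====
-- stated objective: alternative
-- what changed: Replaces A's seen-set normalize passes plus filter with a worklist loop: take the head, emit its stripped text if nonempty and valid, then rewrite the remaining list removing every later element that strips to the same text, so deduplication happens by shrinking the worklist instead of a seen set.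
import Mathlib
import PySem

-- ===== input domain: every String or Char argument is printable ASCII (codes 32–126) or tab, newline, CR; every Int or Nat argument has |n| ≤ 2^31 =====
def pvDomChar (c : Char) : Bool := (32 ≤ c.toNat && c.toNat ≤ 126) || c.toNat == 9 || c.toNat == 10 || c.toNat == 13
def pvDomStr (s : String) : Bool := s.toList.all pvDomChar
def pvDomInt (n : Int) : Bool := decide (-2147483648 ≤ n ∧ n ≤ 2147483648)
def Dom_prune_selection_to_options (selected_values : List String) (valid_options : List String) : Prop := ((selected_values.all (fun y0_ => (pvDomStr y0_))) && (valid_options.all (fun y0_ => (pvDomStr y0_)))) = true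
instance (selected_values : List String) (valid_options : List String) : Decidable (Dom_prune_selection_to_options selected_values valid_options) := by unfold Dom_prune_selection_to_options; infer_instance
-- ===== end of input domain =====

-- B replaces the seen-set normalize/filter passes by a worklist loop that emits the head's
-- stripped text when valid and removes its later duplicates from the worklist; same result,
-- a different algorithm of similar cost (alternative, not claimed faster).

-- ===== PORT A =====
-- helper normalize_brief_selection: for-loop over values with (normalized, seen) state
def pvNormLoopA (values : List String) (normalized : List String) (seen : PySem.Set String) : List String :=
  match values with
  | [] => normalized
  | v :: rest =>
      let text := PySem.Str.strip v
      if text = "" || PySem.Set.contains seen text then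
        pvNormLoopA rest normalized seen
      else
        pvNormLoopA rest (normalized ++ [text]) (PySem.Set.add seen text)

def normalize_brief_selection (values : List String) : List String :=
  pvNormLoopA values [] PySem.Set.empty

def prune_selection_to_options (selected_values : List String) (valid_options : List String) : List String :=
  let valid_option_set : PySem.Set String := PySem.Set.ofList (normalize_brief_selection valid_options)
  (normalize_brief_selection selected_values).filter (fun value => PySem.Set.contains valid_option_set value)

-- ===== PORT B =====
-- while-loop over the shrinking worklist `remaining` with accumulator `result`
def pvPruneLoopB (valid_option_set : PySem.Set String) (result : List String) (remaining : List String) : List String :=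
  match remaining with
  | [] => result
  | v :: rest =>
      let text := PySem.Str.strip v
      pvPruneLoopB valid_option_set
        (if text ≠ "" && PySem.Set.contains valid_option_set text then result ++ [text] else result)
        (rest.filter (fun w => PySem.Str.strip w != text))
termination_by remaining.length
decreasing_by simpa using Nat.lt_succ_of_le (List.length_filter_le _ rest)

def prune_selection_to_options_alt (selected_values : List String) (valid_options : List String) : List String :=
  let valid_option_set : PySem.Set String := PySem.Set.ofList (valid_options.map PySem.Str.strip)
  pvPruneLoopB valid_option_set [] selected_values

-- ===== PRECONDITION & SPEC =====
def Spec_prune_selection_to_options (selected_values : List String) (valid_options : List String) (out : List String) : Prop := out = prune_selection_to_options_alt selected_values valid_options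
instance (selected_values : List String) (valid_options : List String) (out : List String) : Decidable (Spec_prune_selection_to_options selected_values valid_options out) := by unfold Spec_prune_selection_to_options; infer_instance

-- ===== CLAIM (what is proved, stated in full; the proofs are below) =====
def Claim_equal_prune_selection_to_options : Prop := ∀ (selected_values : List String) (valid_options : List String), Dom_prune_selection_to_options selected_values valid_options → Spec_prune_selection_to_options selected_values valid_options (prune_selection_to_options selected_values valid_options)

-- ===== LEMMAS AND PROOFS =====

-- accumulator lemma for A's normalize loop
theorem pvNormLoopA_acc (values : List String) (n : List String) (s : PySem.Set String) :
    pvNormLoopA values n s = n ++ pvNormLoopA values [] s := by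
  induction values generalizing n s with
  | nil => simp [pvNormLoopA]
  | cons v rest ih =>
      simp only [pvNormLoopA, List.nil_append]
      split_ifs with h
      · exact ih n s
      · rw [ih (n ++ [PySem.Str.strip v]) _, ih [PySem.Str.strip v] _]
        simp

-- accumulator lemma for B's worklist loop
theorem pvPruneLoopB_acc_fuel (valid : PySem.Set String) :
    ∀ (n : Nat) (remaining : List String), remaining.length ≤ n →
      ∀ (result : List String), pvPruneLoopB valid result remaining = result ++ pvPruneLoopB valid [] remaining := by
  intro n
  induction n with
  | zero =>
      intro remaining h result
      cases remaining with
      | nil => simp [pvPruneLoopB]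
      | cons v rest => simp at h
  | succ n ih =>
      intro remaining h result
      cases remaining with
      | nil => simp [pvPruneLoopB]
      | cons v rest =>
          rw [pvPruneLoopB, pvPruneLoopB]
          have hlen : (rest.filter (fun w => PySem.Str.strip w != PySem.Str.strip v)).length ≤ n :=
            le_trans (List.length_filter_le _ rest) (by simpa using h)
          split_ifs with hc
          · rw [ih _ hlen (result ++ [PySem.Str.strip v]), ih _ hlen ([] ++ [PySem.Str.strip v])]
            simp
          · rw [ih _ hlen result]

theorem pvPruneLoopB_acc (valid : PySem.Set String) (remaining : List String) (result : List String) :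
    pvPruneLoopB valid result remaining = result ++ pvPruneLoopB valid [] remaining :=
  pvPruneLoopB_acc_fuel valid remaining.length remaining le_rfl result

-- membership in A's normalized list
theorem mem_pvNormLoopA (values : List String) (s : PySem.Set String) (t : String) :
    t ∈ pvNormLoopA values [] s ↔ t ∈ values.map PySem.Str.strip ∧ t ≠ "" ∧ t ∉ s := by
  induction values generalizing s with
  | nil => simp [pvNormLoopA]
  | cons v rest ih =>
      simp only [pvNormLoopA, List.nil_append, List.map_cons, List.mem_cons]
      split_ifs with h
      · rw [ih]
        simp only [Bool.or_eq_true, decide_eq_true_eq, PySem.Set.contains_iff] at h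
        constructor
        · rintro ⟨hm, hne, hns⟩; exact ⟨Or.inr hm, hne, hns⟩
        · rintro ⟨hm, hne, hns⟩
          rcases hm with rfl | hm
          · rcases h with h | h
            · exact absurd h hne
            · exact absurd h hns
          · exact ⟨hm, hne, hns⟩
      · rw [pvNormLoopA_acc]
        simp only [Bool.or_eq_true, decide_eq_true_eq, PySem.Set.contains_iff, not_or] at h
        simp only [List.singleton_append, List.mem_cons, ih, PySem.Set.mem_add]
        constructor
        · rintro (rfl | ⟨hm, hne, hns⟩)
          · exact ⟨Or.inl rfl, h.1, h.2⟩
          · rw [not_or] at hns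
            exact ⟨Or.inr hm, hne, hns.1⟩
        · rintro ⟨hm, hne, hns⟩
          rcases hm with rfl | hm
          · exact Or.inl rfl
          · by_cases ht : t = PySem.Str.strip v
            · exact Or.inl ht
            · exact Or.inr ⟨hm, hne, by simp [hns, ht]⟩

-- removing elements that strip to an already-seen (or empty) text does not change A's loop
theorem pvNormLoopA_skip (values : List String) (s : PySem.Set String) (t : String)
    (h : t = "" ∨ t ∈ s) :
    pvNormLoopA (values.filter (fun v => PySem.Str.strip v != t)) [] s = pvNormLoopA values [] s := by
  induction values generalizing s with
  | nil => simp
  | cons v rest ih =>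
      by_cases hvt : PySem.Str.strip v = t
      · have : (v :: rest).filter (fun v => PySem.Str.strip v != t) =
            rest.filter (fun v => PySem.Str.strip v != t) := by
          simp [hvt]
        rw [this, ih s h]
        have hc : ((PySem.Str.strip v = "" : Bool) || PySem.Set.contains s (PySem.Str.strip v)) = true := by
          rw [hvt]
          rcases h with h | h
          · simp [h]
          · simp [h]
        conv_rhs => rw [pvNormLoopA]
        simp only [hc, if_true]
      · have : (v :: rest).filter (fun v => PySem.Str.strip v != t) =
            v :: rest.filter (fun v => PySem.Str.strip v != t) := by
          simp [hvt]
        rw [this]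
        simp only [pvNormLoopA, List.nil_append]
        split_ifs with hc
        · exact ih s h
        · rw [pvNormLoopA_acc _ [PySem.Str.strip v], pvNormLoopA_acc _ [PySem.Str.strip v], ih]
          rcases h with h | h
          · exact Or.inl h
          · exact Or.inr ((PySem.Set.mem_add _ _ _).2 (Or.inl h))

-- A's loop only looks at set membership, and never at t when no element strips to t
theorem pvNormLoopA_congr_avoid (t : String) (values : List String) (s1 s2 : PySem.Set String)
    (hs : ∀ x : String, x ≠ t → (x ∈ s1 ↔ x ∈ s2))
    (hv : ∀ v ∈ values, PySem.Str.strip v ≠ t) :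
    pvNormLoopA values [] s1 = pvNormLoopA values [] s2 := by
  induction values generalizing s1 s2 with
  | nil => rfl
  | cons v rest ih =>
      have hvt : PySem.Str.strip v ≠ t := hv v (by simp)
      have hcon : PySem.Set.contains s1 (PySem.Str.strip v) = PySem.Set.contains s2 (PySem.Str.strip v) := by
        rcases h2 : PySem.Set.contains s2 (PySem.Str.strip v) with _ | _
        · rw [Bool.eq_false_iff]
          intro h1
          rw [Bool.eq_false_iff] at h2
          exact h2 ((PySem.Set.contains_iff _ _).2 ((hs _ hvt).1 ((PySem.Set.contains_iff _ _).1 h1)))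
        · exact (PySem.Set.contains_iff _ _).2 ((hs _ hvt).2 ((PySem.Set.contains_iff _ _).1 h2))
      simp only [pvNormLoopA, List.nil_append, hcon]
      split_ifs with hc
      · exact ih s1 s2 hs (fun w hw => hv w (List.mem_cons_of_mem _ hw))
      · rw [pvNormLoopA_acc _ [PySem.Str.strip v], pvNormLoopA_acc _ [PySem.Str.strip v]]
        congr 1
        refine ih _ _ (fun x hx => ?_) (fun w hw => hv w (List.mem_cons_of_mem _ hw))
        simp only [PySem.Set.mem_add]
        exact or_congr (hs x hx) Iff.rfl

-- the two valid sets agree on nonempty strings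
theorem valid_sets_agree (valid_options : List String) (t : String) (ht : t ≠ "") :
    PySem.Set.contains (PySem.Set.ofList (valid_options.map PySem.Str.strip)) t =
      PySem.Set.contains (PySem.Set.ofList (normalize_brief_selection valid_options)) t := by
  rcases h : PySem.Set.contains (PySem.Set.ofList (normalize_brief_selection valid_options)) t with _ | _
  · rw [Bool.eq_false_iff]
    intro hB
    rw [PySem.Set.contains_iff, PySem.Set.mem_ofList] at hB
    have : t ∈ normalize_brief_selection valid_options := by
      unfold normalize_brief_selection
      rw [mem_pvNormLoopA]
      exact ⟨hB, ht, by simp [PySem.Set.empty]⟩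
    rw [Bool.eq_false_iff] at h
    exact h (by rw [PySem.Set.contains_iff, PySem.Set.mem_ofList]; exact this)
  · rw [PySem.Set.contains_iff, PySem.Set.mem_ofList] at h
    unfold normalize_brief_selection at h
    rw [mem_pvNormLoopA] at h
    rw [PySem.Set.contains_iff, PySem.Set.mem_ofList]
    exact h.1

-- main lemma: A's filter-of-normalize equals B's worklist loop (strong induction on length)
theorem main_lemma (valid_options : List String) :
    ∀ (n : Nat) (values : List String), values.length ≤ n →
      (pvNormLoopA values [] PySem.Set.empty).filter
          (fun x => PySem.Set.contains (PySem.Set.ofList (normalize_brief_selection valid_options)) x) =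
        pvPruneLoopB (PySem.Set.ofList (valid_options.map PySem.Str.strip)) [] values := by
  intro n
  induction n with
  | zero =>
      intro values h
      cases values with
      | nil => simp [pvNormLoopA, pvPruneLoopB]
      | cons v rest => simp at h
  | succ n ih =>
      intro values h
      cases values with
      | nil => simp [pvNormLoopA, pvPruneLoopB]
      | cons v rest =>
          rw [pvPruneLoopB, pvNormLoopA]
          by_cases ht : PySem.Str.strip v = ""
          · have hlen : (rest.filter (fun w => PySem.Str.strip w != ("" : String))).length ≤ n :=
              le_trans (List.length_filter_le _ rest) (by simpa using h)
            simp only [ht]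
            rw [if_pos (by simp), if_neg (by simp)]
            rw [← pvNormLoopA_skip rest PySem.Set.empty "" (Or.inl rfl), ih _ hlen]
          · have hlen : (rest.filter (fun w => PySem.Str.strip w != PySem.Str.strip v)).length ≤ n :=
              le_trans (List.length_filter_le _ rest) (by simpa using h)
            rw [if_neg (by simp [ht])]
            simp only [List.nil_append]
            rw [pvNormLoopA_acc _ [PySem.Str.strip v], List.singleton_append, List.filter_cons]
            have hrest : pvNormLoopA rest [] (PySem.Set.add PySem.Set.empty (PySem.Str.strip v)) =
                pvNormLoopA (rest.filter (fun w => PySem.Str.strip w != PySem.Str.strip v)) []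
                  PySem.Set.empty := by
              rw [← pvNormLoopA_skip rest (PySem.Set.add PySem.Set.empty (PySem.Str.strip v))
                    (PySem.Str.strip v) (Or.inr ((PySem.Set.mem_add _ _ _).2 (Or.inr rfl)))]
              refine pvNormLoopA_congr_avoid (PySem.Str.strip v) _ _ _ (fun x hx => ?_) (fun w hw => ?_)
              · rw [PySem.Set.mem_add]
                simp [PySem.Set.empty, hx]
              · have := (List.mem_filter.1 hw).2
                simpa using this
            rw [hrest, ih _ hlen, pvPruneLoopB_acc]
            rw [valid_sets_agree valid_options (PySem.Str.strip v) ht]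
            split_ifs with h1 h2 h2
            · rw [pvPruneLoopB_acc _ _ [PySem.Str.strip v]]
              simp
            · simp_all
            · simp_all
            · simp_all

-- ===== VERDICT (by name: the statement is the Claim_ definition above) =====
theorem prune_selection_to_options_spec : Claim_equal_prune_selection_to_options := by
  intro selected_values valid_options _
  unfold Spec_prune_selection_to_options prune_selection_to_options prune_selection_to_options_alt
  exact main_lemma valid_options selected_values.length selected_values le_rfl
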